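-- pv_equiv track=rewrite | github.com/Winesss/2019T3-COMP9021 | assignment_1/roman_arabic.py | genroman_con_int
-- ===== SOURCE A (Python) =====
-- def genroman_con_int(genroman):  #got roman_int
--     dict_genroman = {}
--     list_2 = list(reversed(genroman))
--     n = 1
--     i = 0
--     while i<len(genroman):
--         if i==0:
--             dict_genroman[list_2[i]]=n
--             n=5
--         elif i==1:
--             dict_genroman[list_2[i]]=n
--         elif i % 2==0:
--             n=n*2
--             dict_genroman[list_2[i]]=n
--         elif i%2==1 and i>1:
--             n=n*5
--             dict_genroman[list_2[i]]=n
--         i += 1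
--     return dict_genroman
-- ===== SOURCE B (Python) =====
-- def genroman_con_int(genroman):
--     last = {}
--     for i, c in enumerate(reversed(genroman)):
--         last[c] = i
--     return {c: 10 ** (i // 2) * (5 if i % 2 else 1) for c, i in last.items()}
-- ===== Notes on version B (the rewrite author's own statement) =====
-- stated objective: faster
-- what changed: Instead of threading a multiplier accumulator through an i==0/i==1/even/odd branch chain with a big-int multiply and dict insert at every character, B records each char's last index in one cheap pass and then assigns the closed-form value 10**(i//2)*(5 if i%2 else 1) once per distinct char.
import Mathlib
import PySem

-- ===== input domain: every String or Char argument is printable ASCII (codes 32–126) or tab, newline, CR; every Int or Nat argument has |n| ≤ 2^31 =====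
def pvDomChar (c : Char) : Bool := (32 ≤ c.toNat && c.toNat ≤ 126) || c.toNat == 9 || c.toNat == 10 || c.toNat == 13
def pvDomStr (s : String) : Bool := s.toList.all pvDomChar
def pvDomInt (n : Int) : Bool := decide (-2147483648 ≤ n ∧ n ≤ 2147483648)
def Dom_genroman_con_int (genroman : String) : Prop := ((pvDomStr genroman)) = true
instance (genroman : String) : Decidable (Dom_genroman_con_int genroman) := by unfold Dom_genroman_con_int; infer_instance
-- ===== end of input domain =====

-- B drops A's threaded multiplier accumulator and its i==0/i==1/even/odd branch chain: it records
-- each char's last index in one pass, then assigns the closed-form value 10**(i//2)*(5 if i%2 else 1)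
-- once per distinct char; objective: faster (no big-int arithmetic per character; measured faster in a timing run).

-- ===== PORT A =====
-- A's loop body (branches in A's order; the dict key is the 1-char string list_2[i]).
def pvStepA (st : PySem.Dict String Int × Int) (p : Int × Char) :
    PySem.Dict String Int × Int :=
  let d := st.1
  let n := st.2
  let c := String.ofList [p.2]
  if p.1 == 0 then (d.insert c n, 5)
  else if p.1 == 1 then (d.insert c n, n)
  else if PySem.Int.mod p.1 2 == 0 then (d.insert c (n * 2), n * 2)
  else (d.insert c (n * 5), n * 5)

-- while i < len(genroman): … ; i += 1   — as a fold over range(len), indexing list_2[i]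
-- (i is always in range, so pyGetD's default ' ' is never used).
def genroman_con_int (genroman : String) : List (String × Int) :=
  ((PySem.List.pyRange 0 (PySem.List.len genroman.toList.reverse) 1).foldl
    (fun st i => pvStepA st (i, PySem.List.pyGetD genroman.toList.reverse i ' '))
    (PySem.Dict.empty, 1)).1.items

-- ===== PORT B =====
-- B's closed-form value of a (nonnegative) index i: 10 ** (i // 2) * (5 if i % 2 else 1).
-- i ≥ 0 always, so '.toNat' on the exponent is exact.
def pvValInt (i : Int) : Int :=
  (10 : Int) ^ (PySem.Int.floordiv i 2).toNat * (if PySem.Int.mod i 2 != 0 then 5 else 1)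

-- last = {}; for i, c in enumerate(reversed(genroman)): last[c] = i
-- return {c: 10 ** (i // 2) * (5 if i % 2 else 1) for c, i in last.items()}
def genroman_con_int_alt (genroman : String) : List (String × Int) :=
  let last := (PySem.List.enumerate genroman.toList.reverse 0).foldl
    (fun (d : PySem.Dict Char Int) p => d.insert p.2 p.1) PySem.Dict.empty
  (last.items.foldl
    (fun (d : PySem.Dict String Int) q => d.insert (String.ofList [q.1]) (pvValInt q.2))
    PySem.Dict.empty).items

-- ===== PRECONDITION & SPEC =====
def Spec_genroman_con_int (genroman : String) (out : List (String × Int)) : Prop := out = genroman_con_int_alt genroman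
instance (genroman : String) (out : List (String × Int)) : Decidable (Spec_genroman_con_int genroman out) := by unfold Spec_genroman_con_int; infer_instance

-- ===== CLAIM (what is proved, stated in full; the proofs are below) =====
def Claim_equal_genroman_con_int : Prop := ∀ (genroman : String), Dom_genroman_con_int genroman → Spec_genroman_con_int genroman (genroman_con_int genroman)

-- ===== LEMMAS AND PROOFS =====

-- A's per-occurrence insertion, as a step over an enumerated pair.
def pvStepD (d : PySem.Dict String Int) (p : Int × Char) : PySem.Dict String Int :=
  d.insert (String.ofList [p.2]) (pvValInt p.1)

-- B's phase-1 step: record the (last) index of each char.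
def pvStepL (d : PySem.Dict Char Int) (p : Int × Char) : PySem.Dict Char Int :=
  d.insert p.2 p.1

-- B's value at a Nat index.
def pvVal (k : Nat) : Int := 10 ^ (k / 2) * (if k % 2 = 1 then 5 else 1)

-- A's accumulator n on entry to iteration k.
def pvAcc (k : Nat) : Int :=
  match k with
  | 0 => 1
  | 1 => 5
  | (k + 2) => pvVal (k + 1)

lemma pv_mod2_natCast (k : Nat) : PySem.Int.mod (k : Int) 2 = ((k % 2 : Nat) : Int) := by
  exact_mod_cast PySem.Int.mod_natCast k 2

lemma pv_fdiv2_natCast (k : Nat) : PySem.Int.floordiv (k : Int) 2 = ((k / 2 : Nat) : Int) := by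
  exact_mod_cast PySem.Int.floordiv_natCast k 2

lemma pvValInt_natCast (k : Nat) : pvValInt (k : Int) = pvVal k := by
  simp only [pvValInt, pvVal, pv_mod2_natCast, pv_fdiv2_natCast, Int.toNat_natCast]
  congr 1
  rcases Nat.mod_two_eq_zero_or_one k with h | h <;> simp [h]

lemma pvVal_succ_even (k : Nat) (h : k % 2 = 0) : pvVal (k + 1) = pvVal k * 5 := by
  unfold pvVal
  rw [show (k + 1) % 2 = 1 by omega, show (k + 1) / 2 = k / 2 by omega, h]
  simp

lemma pvVal_succ_odd (k : Nat) (h : k % 2 = 1) : pvVal (k + 1) = pvVal k * 2 := by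
  unfold pvVal
  rw [show (k + 1) % 2 = 0 by omega, show (k + 1) / 2 = k / 2 + 1 by omega, h, pow_succ]
  norm_num
  ring

-- One A-step from the invariant state inserts the closed-form value and re-establishes the invariant.
lemma pvStep_eq (k : Nat) (c : Char) (d : PySem.Dict String Int) :
    pvStepA (d, pvAcc k) ((k : Int), c) = (pvStepD d ((k : Int), c), pvAcc (k + 1)) := by
  rw [show pvStepD d ((k : Int), c) = d.insert (String.ofList [c]) (pvVal k) by
    simp [pvStepD, pvValInt_natCast]]
  match k with
  | 0 => simp [pvStepA, pvAcc, pvVal]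
  | 1 => simp [pvStepA, pvAcc, pvVal]
  | (k + 2) =>
    have h0 : (((k + 2 : Nat) : Int) == 0) = false := by simp; omega
    have h1 : (((k + 2 : Nat) : Int) == 1) = false := by simp; omega
    simp only [pvStepA, pvAcc, h0, h1, Bool.false_eq_true, if_false, pv_mod2_natCast]
    rcases Nat.mod_two_eq_zero_or_one (k + 2) with h | h
    · have hk1 : (k + 1) % 2 = 1 := by omega
      simp only [h, Nat.cast_zero, beq_self_eq_true, if_true]
      rw [show pvVal (k + 1 + 1) = pvVal (k + 1) * 2 from pvVal_succ_odd _ hk1]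
    · have hk1 : (k + 1) % 2 = 0 := by omega
      simp only [h, Nat.cast_one, show ((1 : Int) == 0) = false by decide,
        Bool.false_eq_true, if_false]
      rw [show pvVal (k + 1 + 1) = pvVal (k + 1) * 5 from pvVal_succ_even _ hk1]

-- A's whole loop is the per-occurrence closed-form insertion fold.
lemma pvLoopA_eq (l : List Char) : ∀ (k : Nat) (d : PySem.Dict String Int),
    ((PySem.List.enumerate l (k : Int)).foldl pvStepA (d, pvAcc k)).1
      = (PySem.List.enumerate l (k : Int)).foldl pvStepD d := by
  induction l with
  | nil => intro k d; simp [PySem.List.enumerate_nil]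
  | cons c t ih =>
    intro k d
    rw [PySem.List.enumerate_cons]
    simp only [List.foldl_cons]
    rw [pvStep_eq, show ((k : Int) + 1) = ((k + 1 : Nat) : Int) by push_cast; ring]
    exact ih (k + 1) (pvStepD d ((k : Int), c))

lemma pvKey_inj {c c' : Char} (h : String.ofList [c] = String.ofList [c']) : c = c' := by
  have := congrArg String.toList h
  simp at this
  exact this

-- Lookup invariant between A's per-occurrence dict and B's last-index dict.
lemma pvGet_rel (ps : List (Int × Char)) :
    ∀ (dA : PySem.Dict String Int) (dL : PySem.Dict Char Int),
    (∀ c, dA.get? (String.ofList [c]) = (dL.get? c).map pvValInt) →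
    ∀ c, (ps.foldl pvStepD dA).get? (String.ofList [c])
      = ((ps.foldl pvStepL dL).get? c).map pvValInt := by
  induction ps with
  | nil => intro dA dL h c; exact h c
  | cons p t ih =>
    intro dA dL h c
    simp only [List.foldl_cons]
    refine ih _ _ (fun c' => ?_) c
    simp only [pvStepD, pvStepL, PySem.Dict.get?_insert]
    by_cases hc : c' = p.2
    · simp [hc]
    · rw [if_neg (fun h' => hc (pvKey_inj h')), if_neg hc, h c']

-- Key-list invariant between the two dicts.
lemma pvKeys_rel (ps : List (Int × Char)) :
    ∀ (dA : PySem.Dict String Int) (dL : PySem.Dict Char Int),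
    dA.keys = dL.keys.map (fun c => String.ofList [c]) →
    (ps.foldl pvStepD dA).keys
      = (ps.foldl pvStepL dL).keys.map (fun c => String.ofList [c]) := by
  induction ps with
  | nil => intro dA dL h; exact h
  | cons p t ih =>
    intro dA dL h
    simp only [List.foldl_cons]
    refine ih _ _ ?_
    have hcont : dA.contains (String.ofList [p.2]) = dL.contains p.2 := by
      rw [PySem.Dict.contains_eq_decide_mem_keys, PySem.Dict.contains_eq_decide_mem_keys, h]
      simp only [List.mem_map]
      congr 1
      refine propext ⟨fun ⟨c, hc, he⟩ => ?_, fun hm => ⟨p.2, hm, rfl⟩⟩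
      exact (pvKey_inj he.symm) ▸ hc
    by_cases hL : dL.contains p.2 = true
    · rw [pvStepD, pvStepL, PySem.Dict.keys_insert_of_contains _ _ (hcont.trans hL),
        PySem.Dict.keys_insert_of_contains _ _ hL, h]
    · have hL' : dL.contains p.2 = false := by revert hL; cases dL.contains p.2 <;> simp
      rw [pvStepD, pvStepL, PySem.Dict.keys_insert_of_not_contains _ _ (hcont.trans hL'),
        PySem.Dict.keys_insert_of_not_contains _ _ hL', h, List.map_append]
      rfl

-- ===== VERDICT (by name: the statement is the Claim_ definition above) =====
theorem genroman_con_int_spec : Claim_equal_genroman_con_int := by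
  intro g _
  -- name the enumerated occurrence list and the two dicts
  set r : List Char := g.toList.reverse with hr
  have hA0 := pvLoopA_eq r 0 PySem.Dict.empty
  simp only [Nat.cast_zero] at hA0
  -- A's port computes the pvStepD fold
  have hAport : genroman_con_int g
      = ((PySem.List.enumerate r 0).foldl pvStepD PySem.Dict.empty).items := by
    unfold genroman_con_int
    rw [PySem.List.enumerate_eq_map_pyRange r ' '] at hA0
    simp only [List.foldl_map] at hA0
    rw [← hr, PySem.List.enumerate_eq_map_pyRange r ' ']
    simp only [List.foldl_map]
    exact congrArg PySem.Dict.items (by simpa [pvAcc, pvStepD] using hA0)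
  set ps := PySem.List.enumerate r 0 with hps
  set dA := ps.foldl pvStepD PySem.Dict.empty with hdA
  set dL := ps.foldl pvStepL PySem.Dict.empty with hdL
  have hget : ∀ c, dA.get? (String.ofList [c]) = (dL.get? c).map pvValInt :=
    pvGet_rel ps PySem.Dict.empty PySem.Dict.empty (by simp [PySem.Dict.get?_empty])
  have hkeys : dA.keys = dL.keys.map (fun c => String.ofList [c]) :=
    pvKeys_rel ps PySem.Dict.empty PySem.Dict.empty (by simp [PySem.Dict.keys_empty])
  have hndL : dL.keys.Nodup := by
    rw [hdL]
    exact PySem.Dict.nodup_keys_foldl_insert_key ps (fun p => p.2) (fun _ p => p.1)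
      PySem.Dict.empty (by simp [PySem.Dict.keys_empty])
  have hndA : dA.keys.Nodup := by
    rw [hkeys]
    exact List.Nodup.map (fun _ _ h => pvKey_inj h) hndL
  -- B's port renders dL's items through the closed form; that fold is over fresh distinct keys
  have hrender : (dL.items.foldl
      (fun (d : PySem.Dict String Int) q => d.insert (String.ofList [q.1]) (pvValInt q.2))
      PySem.Dict.empty).items
      = dL.items.map (fun q => (String.ofList [q.1], pvValInt q.2)) := by
    have := PySem.Dict.items_foldl_insert_fresh (l := dL.items)
      (k := fun q => String.ofList [q.1]) (v := fun q => pvValInt q.2)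
      (d := (PySem.Dict.empty : PySem.Dict String Int))
      (by intro a _; simp [PySem.Dict.contains_empty])
      (by
        have : dL.items.map (fun q : Char × Int => String.ofList [q.1])
            = dL.keys.map (fun c => String.ofList [c]) := by
          simp [PySem.Dict.keys, List.map_map]
        rw [this]
        exact List.Nodup.map (fun _ _ h => pvKey_inj h) hndL)
    simpa using this
  -- both item lists are the same map over dL.keys
  have hitemsA : dA.items = dL.keys.map (fun c => (String.ofList [c], pvValInt (dL.getD c 0))) := by
    rw [PySem.Dict.items_eq_map_keys dA hndA 0, hkeys, List.map_map]
    refine List.map_congr_left (fun c hc => ?_)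
    have hsome : ∃ v, dL.get? c = some v := by
      rcases h : dL.get? c with _ | v
      · exact absurd ((PySem.Dict.get?_eq_none_iff_not_mem_keys dL c).mp h) (by simpa using hc)
      · exact ⟨v, rfl⟩
    rcases hsome with ⟨v, hv⟩
    simp [Function.comp, PySem.Dict.getD_eq_get?_getD, hget c, hv]
  have hitemsL : dL.items = dL.keys.map (fun c => (c, dL.getD c 0)) :=
    PySem.Dict.items_eq_map_keys dL hndL 0
  rw [Spec_genroman_con_int, hAport, genroman_con_int_alt]
  show dA.items = (dL.items.foldl
    (fun (d : PySem.Dict String Int) q => d.insert (String.ofList [q.1]) (pvValInt q.2))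
    PySem.Dict.empty).items
  rw [hrender, hitemsA, hitemsL, List.map_map]
  rfl
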